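-- pv_equiv track=rewrite | github.com/Arkkraa/466-lab2 | model_data.py | get_term_frequencies
-- ===== SOURCE A (Python) =====
-- def get_term_frequencies(data):
-- 	model = dict()
--
-- 	for key, value in data.items():
-- 		term_freq = dict()
-- 		for word in value['text']:
-- 			if word not in term_freq.keys():
-- 				term_freq[word] = 1
-- 			else:
-- 				term_freq[word] += 1
-- 		model[key] = term_freq
--
-- 	return model
-- ===== SOURCE B (Python) =====
-- def get_term_frequencies(data):
-- 	def tf(words):
-- 		out = {}
-- 		rest = list(words)
-- 		while rest:
-- 			w = rest[0]
-- 			out[w] = rest.count(w)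
-- 			rest = [x for x in rest if x != w]
-- 		return out
--
-- 	return {key: tf(value['text']) for key, value in data.items()}
-- ===== Notes on version B (the rewrite author's own statement) =====
-- stated objective: alternative
-- what changed: The running hash-counter is replaced by a worklist remove-and-count scheme: repeatedly take the first remaining word, record its count with list.count, and filter out all its occurrences; the outer accumulator loop becomes a dict comprehension.
import Mathlib
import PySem

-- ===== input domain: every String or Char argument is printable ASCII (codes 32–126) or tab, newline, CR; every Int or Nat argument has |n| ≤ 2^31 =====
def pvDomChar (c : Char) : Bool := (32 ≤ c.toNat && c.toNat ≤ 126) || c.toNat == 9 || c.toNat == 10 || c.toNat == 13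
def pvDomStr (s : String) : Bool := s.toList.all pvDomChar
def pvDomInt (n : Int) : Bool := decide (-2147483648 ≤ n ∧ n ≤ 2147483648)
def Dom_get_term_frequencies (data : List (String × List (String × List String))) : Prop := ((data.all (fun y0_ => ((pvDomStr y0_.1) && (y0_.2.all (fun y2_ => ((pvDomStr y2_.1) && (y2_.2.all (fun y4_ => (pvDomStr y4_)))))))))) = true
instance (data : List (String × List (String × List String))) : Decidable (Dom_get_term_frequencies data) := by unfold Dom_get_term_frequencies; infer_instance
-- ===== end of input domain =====

-- B replaces A's running hash-counter with a worklist remove-and-count recursion (count the first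
-- remaining word, filter out its occurrences, recurse); outer accumulator loop becomes a map (objective: alternative).

-- ===== PORT A =====
-- value['text'] : Pre_ guarantees the key exists, so getD never takes its default.
def get_term_frequencies (data : List (String × List (String × List String))) : List (String × List (String × Int)) :=
  (data.foldl
    (fun model kv =>
      model.insert kv.1
        (((PySem.Dict.mk kv.2).getD "text" []).foldl
          (fun tf word =>
            if tf.contains word = false then tf.insert word 1
            else tf.insert word (tf.getD word 0 + 1))
          (PySem.Dict.empty : PySem.Dict String Int)).items)
    (PySem.Dict.empty : PySem.Dict String (List (String × Int)))).items

-- ===== PORT B =====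
-- the 'while rest' worklist loop of Source B: count rest[0] in the current worklist, drop its
-- occurrences; the fuel is the worklist length, which strictly decreases each iteration
def tfBGo : Nat → List String → List (String × Int)
  | _, [] => []
  | 0, _ :: _ => []
  | n + 1, w :: ws => (w, ((w :: ws).count w : Int)) :: tfBGo n (ws.filter (fun x => x != w))

def tfB (words : List String) : List (String × Int) := tfBGo words.length words

def get_term_frequencies_alt (data : List (String × List (String × List String))) : List (String × List (String × Int)) :=
  data.map (fun kv => (kv.1, tfB ((PySem.Dict.mk kv.2).getD "text" [])))

-- ===== PRECONDITION & SPEC =====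
-- A raises KeyError when a document dict lacks the key 'text'; those inputs are excluded. Duplicate
-- outer keys are also excluded: the argument is a Python dict, which cannot hold duplicate keys, so
-- such association lists represent no Python input at all.
def Pre_get_term_frequencies (data : List (String × List (String × List String))) : Prop :=
  (data.all (fun kv => (PySem.Dict.mk kv.2).contains "text")) = true ∧ (data.map Prod.fst).Nodup
instance (data : List (String × List (String × List String))) : Decidable (Pre_get_term_frequencies data) := by unfold Pre_get_term_frequencies; infer_instance

def pvWitness_get_term_frequencies : (List (String × List (String × List String))) :=
  [("d1", [("text", ["a", "b", "a"])]), ("d2", [("text", [])])]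

def Spec_get_term_frequencies (data : List (String × List (String × List String))) (out : List (String × List (String × Int))) : Prop := out = get_term_frequencies_alt data
instance (data : List (String × List (String × List String))) (out : List (String × List (String × Int))) : Decidable (Spec_get_term_frequencies data out) := by unfold Spec_get_term_frequencies; infer_instance

-- ===== CLAIM (what is proved, stated in full; the proofs are below) =====
def Claim_equal_get_term_frequencies : Prop := ∀ (data : List (String × List (String × List String))), Dom_get_term_frequencies data → Pre_get_term_frequencies data → Spec_get_term_frequencies data (get_term_frequencies data)

-- ===== LEMMAS AND PROOFS =====

-- A's branched counting step is the unconditional Counter step.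
lemma tf_step_eq (tf : PySem.Dict String Int) (word : String) :
    (if tf.contains word = false then tf.insert word 1
     else tf.insert word (tf.getD word 0 + 1)) = tf.insert word (tf.getD word 0 + 1) := by
  by_cases h : tf.contains word = false
  · rw [if_pos h, PySem.Dict.getD_of_not_contains tf 0 h]; norm_num
  · rw [if_neg h]

-- adding to a set with a distinguished head commutes past the head when the new element differs
lemma set_add_cons {s : List String} {x w : String} (hxw : x ≠ w) :
    PySem.Set.add (w :: s) x = w :: PySem.Set.add s x := by
  have hwx : (x == w) = false := by simp [hxw]
  simp only [PySem.Set.add, PySem.Set.contains, List.contains_cons, hwx, Bool.false_or]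
  split <;> simp

-- folding Set.add over a list never containing w keeps a leading w in front
lemma foldl_add_cons (ys : List String) (w : String) (s : List String) (hw : w ∉ ys) :
    ys.foldl PySem.Set.add (w :: s) = w :: ys.foldl PySem.Set.add s := by
  induction ys generalizing s with
  | nil => rfl
  | cons x xs ih =>
    have hxw : x ≠ w := fun h => hw (by simp [h])
    simp only [List.foldl_cons, set_add_cons hxw]
    exact ih _ (fun h => hw (by simp [h]))

-- occurrences of an already-present element may be filtered out of a Set.add fold
lemma foldl_add_filter (rest : List String) (w : String) (s : List String) (hw : w ∈ s) :
    rest.foldl PySem.Set.add s = (rest.filter (fun x => x != w)).foldl PySem.Set.add s := by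
  induction rest generalizing s with
  | nil => rfl
  | cons x xs ih =>
    by_cases hx : x = w
    · subst hx
      have hstep : PySem.Set.add s x = s := by
        simp [PySem.Set.add, PySem.Set.contains, hw]
      simp only [List.filter_cons, bne_self_eq_false, Bool.false_eq_true, if_false,
        List.foldl_cons, hstep]
      exact ih s hw
    · have hkeep : (x != w) = true := by simp [hx]
      simp only [List.filter_cons, hkeep, if_pos, List.foldl_cons]
      exact ih _ ((PySem.Set.mem_add s x w).mpr (Or.inl hw))

-- first-occurrence dedup splits off its head: remaining distinct words are those ≠ w
lemma ofList_cons_split (w : String) (ws : List String) :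
    PySem.Set.ofList (w :: ws) = w :: PySem.Set.ofList (ws.filter (fun x => x != w)) := by
  have hadd : PySem.Set.add (PySem.Set.empty : PySem.Set String) w = [w] := rfl
  have hnm : w ∉ ws.filter (fun x => x != w) := by
    intro h
    simpa using (List.of_mem_filter h)
  calc PySem.Set.ofList (w :: ws)
      = ws.foldl PySem.Set.add [w] := by
        simp only [PySem.Set.ofList, List.foldl_cons, hadd]
    _ = (ws.filter (fun x => x != w)).foldl PySem.Set.add [w] :=
        foldl_add_filter ws w [w] (by simp)
    _ = w :: (ws.filter (fun x => x != w)).foldl PySem.Set.add [] :=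
        foldl_add_cons _ w [] hnm
    _ = w :: PySem.Set.ofList (ws.filter (fun x => x != w)) := rfl

-- B's worklist recursion computes exactly dedup-and-count
lemma tfBGo_eq (n : Nat) : ∀ (words : List String), words.length ≤ n →
    tfBGo n words = (PySem.List.dedup words).map (fun w => (w, (words.count w : Int))) := by
  induction n with
  | zero =>
    intro words hlen
    have : words = [] := List.eq_nil_of_length_eq_zero (Nat.le_zero.mp hlen)
    subst this; rfl
  | succ n ih =>
    intro words hlen
    match words with
    | [] => rfl
    | w :: ws =>
      have hflen : (ws.filter (fun x => x != w)).length ≤ n :=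
        le_trans (List.length_filter_le _ _) (Nat.lt_succ_iff.mp (by simpa using hlen))
      rw [tfBGo, ih _ hflen, PySem.List.dedup_eq_ofList, PySem.List.dedup_eq_ofList,
        ofList_cons_split]
      simp only [List.map_cons, List.cons.injEq, true_and]
      refine List.map_congr_left (fun x hx => ?_)
      have hxw : x ≠ w := by
        have := (PySem.Set.mem_ofList _ x).mp hx
        simpa using (List.of_mem_filter this)
      have h1 : (w :: ws).count x = ws.count x := by
        rw [List.count_cons]; simp [Ne.symm hxw]
      have h2 : (ws.filter (fun x => x != w)).count x = ws.count x :=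
        List.count_filter (by simp [hxw])
      rw [h1, h2]

lemma tfB_eq (words : List String) :
    tfB words = (PySem.List.dedup words).map (fun w => (w, (words.count w : Int))) :=
  tfBGo_eq words.length words le_rfl

-- A's inner loop produces exactly B's worklist result
lemma inner_eq (words : List String) :
    (words.foldl
      (fun tf word =>
        if tf.contains word = false then tf.insert word 1
        else tf.insert word (tf.getD word 0 + 1))
      (PySem.Dict.empty : PySem.Dict String Int)).items
    = tfB words := by
  rw [PySem.List.foldl_congr_mem words _ (fun tf word => tf.insert word (tf.getD word 0 + 1)) _
       (fun acc x _ => tf_step_eq acc x),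
     PySem.Dict.foldl_insert_getD_add_one_eq_counter, PySem.Dict.items_counter,
     tfB_eq, PySem.List.dedup_eq_ofList]

-- ===== VERDICT (by name: the statement is the Claim_ definition above) =====
theorem get_term_frequencies_spec : Claim_equal_get_term_frequencies := by
  intro data _ hpre
  unfold Spec_get_term_frequencies get_term_frequencies get_term_frequencies_alt
  rw [PySem.Dict.items_foldl_insert_fresh data (fun kv => kv.1)
        (fun kv => (((PySem.Dict.mk kv.2).getD "text" []).foldl
          (fun tf word =>
            if tf.contains word = false then tf.insert word 1
            else tf.insert word (tf.getD word 0 + 1))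
          (PySem.Dict.empty : PySem.Dict String Int)).items)
        PySem.Dict.empty
        (fun a _ => PySem.Dict.contains_empty _)
        hpre.2]
  simp only [show (PySem.Dict.empty : PySem.Dict String (List (String × Int))).items = []
    from rfl, List.nil_append]
  exact List.map_congr_left (fun kv _ => by rw [inner_eq])
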